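-- pv_equiv track=rewrite | github.com/sparkyfen/tp-7-mtp | reverse_engineering/tp7_usb_probe3.py | midi7_encode
-- ===== SOURCE A (Python) =====
-- def midi7_encode(data_bytes):
--     """Encode raw bytes to MIDI 7-bit format."""
--     encoded = []
--     for i in range(0, len(data_bytes), 7):
--         chunk = data_bytes[i:i+7]
--         msb = 0
--         for j, b in enumerate(chunk):
--             if b & 0x80:
--                 msb |= (1 << j)
--         encoded.append(msb)
--         encoded.extend([b & 0x7F for b in chunk])
--     return encoded
-- ===== SOURCE B (Python) =====
-- def midi7_encode(data_bytes):
--     """Encode raw bytes to MIDI 7-bit format."""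
--     encoded = []
--     msb = 0
--     buffer = []
--     for b in data_bytes:
--         if b & 0x80:
--             msb |= 1 << len(buffer)
--         buffer.append(b & 0x7F)
--         if len(buffer) == 7:
--             encoded.append(msb)
--             encoded.extend(buffer)
--             msb = 0
--             buffer = []
--     if buffer:
--         encoded.append(msb)
--         encoded.extend(buffer)
--     return encoded
-- ===== Notes on version B (the rewrite author's own statement) =====
-- stated objective: alternative
-- what changed: Replaces the chunk-slicing outer loop with nested enumerate pass by a single flat pass over the bytes that carries a running msb accumulator and a buffer of masked bytes, flushing every 7 bytes and once at the end.
import Mathlib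
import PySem

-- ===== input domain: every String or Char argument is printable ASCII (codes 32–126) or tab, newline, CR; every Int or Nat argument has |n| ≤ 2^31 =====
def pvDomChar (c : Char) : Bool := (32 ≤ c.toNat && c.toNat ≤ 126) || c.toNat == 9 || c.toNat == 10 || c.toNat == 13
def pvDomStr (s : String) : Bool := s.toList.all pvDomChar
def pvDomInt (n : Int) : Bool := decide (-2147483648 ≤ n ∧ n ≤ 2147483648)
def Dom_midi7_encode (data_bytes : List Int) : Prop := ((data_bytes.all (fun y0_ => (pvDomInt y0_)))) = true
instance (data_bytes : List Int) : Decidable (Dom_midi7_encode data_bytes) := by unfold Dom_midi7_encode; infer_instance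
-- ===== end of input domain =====

-- B replaces A's chunk-slicing outer loop (with an inner enumerate pass per chunk) by one flat
-- pass carrying a running msb accumulator and a buffer of masked bytes (objective: alternative).

-- ===== PORT A =====
-- helper: the body of A's outer `for i in range(0, len(data_bytes), 7)` loop

def midi7AStep (data_bytes : List Int) (encoded : List Int) (i : Int) : List Int :=
  let chunk := PySem.List.slice data_bytes (some i) (some (i + 7))
  let msb := (PySem.List.enumerate chunk).foldl
    (fun msb jb => if PySem.Int.band jb.2 128 ≠ 0 then PySem.Int.bor msb ((1 : Int) <<< jb.1.toNat) else msb) 0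
  (encoded ++ [msb]) ++ chunk.map (fun b => PySem.Int.band b 127)

def midi7_encode (data_bytes : List Int) : List Int :=
  (PySem.List.pyRange 0 (data_bytes.length : Int) 7).foldl (midi7AStep data_bytes) []

-- ===== PORT B =====
-- helper: the body of B's flat `for b in data_bytes` loop over state (encoded, msb, buffer)
def midi7BStep (st : List Int × Int × List Int) (b : Int) : List Int × Int × List Int :=
  let msb := if PySem.Int.band b 128 ≠ 0 then PySem.Int.bor st.2.1 ((1 : Int) <<< st.2.2.length) else st.2.1
  let buffer := st.2.2 ++ [PySem.Int.band b 127]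
  if buffer.length = 7 then (st.1 ++ msb :: buffer, 0, ([] : List Int)) else (st.1, msb, buffer)

def midi7_encode_alt (data_bytes : List Int) : List Int :=
  let st := data_bytes.foldl midi7BStep ([], 0, [])
  if st.2.2 ≠ [] then st.1 ++ st.2.1 :: st.2.2 else st.1

-- ===== PRECONDITION & SPEC =====
def Spec_midi7_encode (data_bytes : List Int) (out : List Int) : Prop := out = midi7_encode_alt data_bytes
instance (data_bytes : List Int) (out : List Int) : Decidable (Spec_midi7_encode data_bytes out) := by unfold Spec_midi7_encode; infer_instance

-- ===== CLAIM (what is proved, stated in full; the proofs are below) =====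
def Claim_equal_midi7_encode : Prop := ∀ (data_bytes : List Int), Dom_midi7_encode data_bytes → Spec_midi7_encode data_bytes (midi7_encode data_bytes)

-- ===== LEMMAS AND PROOFS =====

def msbAcc (m : Int) (k : Nat) : List Int → Int
  | [] => m
  | b :: t => msbAcc (if PySem.Int.band b 128 ≠ 0 then PySem.Int.bor m ((1 : Int) <<< k) else m) (k + 1) t

def maskLow (b : Int) : Int := PySem.Int.band b 127

def chunksSpec : List Int → List Int
  | [] => []
  | x :: t =>
      msbAcc 0 0 ((x :: t).take 7) ::
        (((x :: t).take 7).map maskLow ++ chunksSpec ((x :: t).drop 7))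
  termination_by xs => xs.length
  decreasing_by simp

lemma enum_foldl_msb (c : List Int) : ∀ (m : Int) (k : Nat),
    (PySem.List.enumerate c (k : Int)).foldl
      (fun msb jb => if PySem.Int.band jb.2 128 ≠ 0 then PySem.Int.bor msb ((1 : Int) <<< jb.1.toNat) else msb) m
      = msbAcc m k c := by
  induction c with
  | nil => intro m k; rfl
  | cons b t ih =>
      intro m k
      have h : ((k : Int) + 1) = ((k + 1 : Nat) : Int) := by push_cast; ring
      simp only [PySem.List.enumerate, List.foldl_cons]
      rw [h, ih]
      conv_rhs => rw [msbAcc]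
      rw [Int.toNat_natCast, Int.shiftLeft_natCast_right]

lemma baux (c : List Int) : ∀ (enc : List Int) (m : Int) (pre : List Int),
    pre.length + c.length ≤ 7 → pre.length < 7 →
    c.foldl midi7BStep (enc, m, pre) =
      if pre.length + c.length = 7 then
        (enc ++ msbAcc m pre.length c :: (pre ++ c.map maskLow), 0, ([] : List Int))
      else (enc, msbAcc m pre.length c, pre ++ c.map maskLow) := by
  induction c with
  | nil =>
      intro enc m pre h1 h2
      simp only [List.foldl_nil, List.length_nil, Nat.add_zero, List.map_nil, List.append_nil, msbAcc]
      rw [if_neg (by omega)]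
  | cons b t ih =>
      intro enc m pre h1 h2
      simp only [List.length_cons] at h1
      simp only [List.foldl_cons]
      by_cases h7 : pre.length + 1 = 7
      · have ht : t = [] := by
          cases t with
          | nil => rfl
          | cons y ys => exfalso; simp only [List.length_cons] at h1; omega
        subst ht
        have hstep : midi7BStep (enc, m, pre) b =
            (enc ++ (if PySem.Int.band b 128 ≠ 0 then PySem.Int.bor m ((1 : Int) <<< pre.length) else m)
              :: (pre ++ [PySem.Int.band b 127]), 0, ([] : List Int)) := by
          simp only [midi7BStep]
          rw [if_pos (by simp; omega)]
        rw [hstep]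
        simp only [List.foldl_nil]
        rw [if_pos (show pre.length + [b].length = 7 by simp only [List.length_cons, List.length_nil]; omega)]
        simp only [msbAcc, maskLow, List.map_cons, List.map_nil]
      · have hstep : midi7BStep (enc, m, pre) b =
            (enc, (if PySem.Int.band b 128 ≠ 0 then PySem.Int.bor m ((1 : Int) <<< pre.length) else m),
              pre ++ [PySem.Int.band b 127]) := by
          simp only [midi7BStep]
          rw [if_neg (by simp; omega)]
        rw [hstep]
        rw [ih enc _ (pre ++ [PySem.Int.band b 127]) (by simp; omega) (by simp; omega)]
        have hl : (pre ++ [PySem.Int.band b 127]).length = pre.length + 1 := by simp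
        rw [hl]
        have harith : pre.length + 1 + t.length = pre.length + (t.length + 1) := by omega
        rw [harith]
        conv_rhs => rw [msbAcc]
        simp [maskLow]

lemma bmain : ∀ (n : Nat) (xs : List Int), xs.length ≤ n → ∀ (enc : List Int),
    (let st := xs.foldl midi7BStep (enc, 0, ([] : List Int));
     if st.2.2 ≠ [] then st.1 ++ st.2.1 :: st.2.2 else st.1) = enc ++ chunksSpec xs := by
  intro n
  induction n with
  | zero =>
      intro xs h enc
      have hx : xs = [] := by cases xs <;> simp_all
      subst hx
      rw [chunksSpec]
      simp
  | succ n ih =>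
      intro xs h enc
      by_cases hnil : xs = []
      · subst hnil; rw [chunksSpec]; simp
      · by_cases hlen : xs.length < 7
        · have := baux xs enc 0 [] (by simpa using Nat.le_of_lt hlen) (by simp)
          simp only [List.length_nil, Nat.zero_add, List.nil_append] at this
          rw [if_neg (by omega)] at this
          simp only [this]
          have hbuf : xs.map maskLow ≠ [] := by simpa using hnil
          simp only [hbuf, ne_eq, not_false_iff, if_true]
          obtain ⟨x, t, hxs⟩ : ∃ x t, xs = x :: t := by
            cases xs with | nil => exact absurd rfl hnil | cons a b => exact ⟨a, b, rfl⟩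
          rw [hxs, chunksSpec, ← hxs]
          have htake : xs.take 7 = xs := List.take_of_length_le (by omega)
          have hdrop : xs.drop 7 = [] := List.drop_eq_nil_of_le (by omega)
          rw [htake, hdrop, chunksSpec]
          simp
        · have hsplit : xs = xs.take 7 ++ xs.drop 7 := (List.take_append_drop 7 xs).symm
          have hlen7 : (xs.take 7).length = 7 := by rw [List.length_take]; omega
          conv_lhs => rw [hsplit]
          simp only [List.foldl_append]
          have hfst := baux (xs.take 7) enc 0 [] (by simp [hlen7]) (by simp)
          simp only [List.length_nil, Nat.zero_add, List.nil_append, hlen7] at hfst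
          simp only [if_true] at hfst
          rw [hfst]
          have := ih (xs.drop 7) (by rw [List.length_drop]; omega) (enc ++ msbAcc 0 0 (xs.take 7) :: (xs.take 7).map maskLow)
          simp only [this]
          obtain ⟨x, t, hxs⟩ : ∃ x t, xs = x :: t := by
            cases xs with | nil => exact absurd rfl hnil | cons a b => exact ⟨a, b, rfl⟩
          rw [hxs, chunksSpec, ← hxs]
          simp [List.append_assoc]

lemma cnt_eq (n : Nat) :
    (if (0 : Int) < (n : Int) then (((n : Int) - 0 + 7 - 1) / 7).toNat else 0) = (n + 6) / 7 := by
  split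
  · have h : ((n : Int) - 0 + 7 - 1) = ((n + 6 : Nat) : Int) := by push_cast; ring
    rw [h, show (7 : Int) = ((7 : Nat) : Int) from rfl, ← Int.natCast_div, Int.toNat_natCast]
  · omega

lemma enum_foldl_msb0 (c : List Int) (m : Int) :
    (PySem.List.enumerate c).foldl
      (fun msb jb => if PySem.Int.band jb.2 128 ≠ 0 then PySem.Int.bor msb ((1 : Int) <<< jb.1.toNat) else msb) m
      = msbAcc m 0 c := by
  have := enum_foldl_msb c m 0
  simpa using this

lemma astep_eq (xs : List Int) (enc : List Int) (k : Nat) :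
    midi7AStep xs enc ((0 : Int) + 7 * (k : Int)) =
      enc ++ msbAcc 0 0 ((xs.drop (7 * k)).take 7) :: ((xs.drop (7 * k)).take 7).map maskLow := by
  have hdef : midi7AStep xs enc ((0 : Int) + 7 * (k : Int)) =
      (enc ++ [(PySem.List.enumerate (PySem.List.slice xs (some ((0 : Int) + 7 * (k : Int))) (some ((0 : Int) + 7 * (k : Int) + 7)))).foldl
        (fun msb jb => if PySem.Int.band jb.2 128 ≠ 0 then PySem.Int.bor msb ((1 : Int) <<< jb.1.toNat) else msb) 0]) ++
        (PySem.List.slice xs (some ((0 : Int) + 7 * (k : Int))) (some ((0 : Int) + 7 * (k : Int) + 7))).map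
          (fun b => PySem.Int.band b 127) := rfl
  rw [hdef]
  have h1 : (0 : Int) + 7 * (k : Int) = ((7 * k : Nat) : Int) := by push_cast; ring
  have h2 : (0 : Int) + 7 * (k : Int) + 7 = ((7 * k : Nat) : Int) + ((7 : Nat) : Int) := by push_cast; ring
  rw [h2, h1, PySem.List.slice_natCast_add]
  rw [enum_foldl_msb0]
  simp only [List.append_assoc, List.singleton_append]
  rfl

lemma amain (cnt : Nat) (xs : List Int) :
    (List.range cnt).foldl (fun enc (k : Nat) => midi7AStep xs enc ((0 : Int) + 7 * (k : Int))) [] =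
      (List.range cnt).flatMap (fun k => msbAcc 0 0 ((xs.drop (7 * k)).take 7) :: ((xs.drop (7 * k)).take 7).map maskLow) := by
  have key : ∀ (l : List Nat) (acc : List Int),
      l.foldl (fun enc (k : Nat) => midi7AStep xs enc ((0 : Int) + 7 * (k : Int))) acc =
        acc ++ l.flatMap (fun k => msbAcc 0 0 ((xs.drop (7 * k)).take 7) :: ((xs.drop (7 * k)).take 7).map maskLow) := by
    intro l
    induction l with
    | nil => simp
    | cons a l ihl =>
        intro acc
        rw [List.foldl_cons, List.flatMap_cons, astep_eq, ihl]
        simp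
  simpa using key (List.range cnt) []

lemma flatMap_range_chunks : ∀ (n : Nat) (xs : List Int), xs.length ≤ n →
    (List.range ((xs.length + 6) / 7)).flatMap
      (fun k => msbAcc 0 0 ((xs.drop (7 * k)).take 7) :: ((xs.drop (7 * k)).take 7).map maskLow)
      = chunksSpec xs := by
  intro n
  induction n with
  | zero =>
      intro xs h
      have hx : xs = [] := by cases xs <;> simp_all
      subst hx
      rw [chunksSpec]
      simp
  | succ n ih =>
      intro xs h
      by_cases hnil : xs = []
      · subst hnil; rw [chunksSpec]; simp
      · have hpos : 1 ≤ xs.length := by cases xs with | nil => exact absurd rfl hnil | cons a b => simp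
        have hcnt : (xs.length + 6) / 7 = ((xs.drop 7).length + 6) / 7 + 1 := by
          rw [List.length_drop]; omega
        rw [hcnt, List.range_succ_eq_map, List.flatMap_cons, List.flatMap_map]
        have hshift : ∀ k : Nat, xs.drop (7 * (k + 1)) = (xs.drop 7).drop (7 * k) := by
          intro k; rw [List.drop_drop]; ring_nf
        simp only [Nat.succ_eq_add_one, hshift]
        rw [ih (xs.drop 7) (by rw [List.length_drop]; omega)]
        obtain ⟨x, t, hxs⟩ : ∃ x t, xs = x :: t := by
          cases xs with | nil => exact absurd rfl hnil | cons a b => exact ⟨a, b, rfl⟩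
        rw [hxs, chunksSpec, ← hxs]
        simp

-- ===== VERDICT (by name: the statement is the Claim_ definition above) =====
theorem midi7_encode_spec : Claim_equal_midi7_encode := by
  intro xs _
  unfold Spec_midi7_encode
  have hb : midi7_encode_alt xs = chunksSpec xs := by
    have := bmain xs.length xs le_rfl []
    simpa [midi7_encode_alt] using this
  have ha : midi7_encode xs = chunksSpec xs := by
    unfold midi7_encode
    rw [PySem.List.pyRange_of_pos 0 (xs.length : Int) (by norm_num)]
    rw [List.foldl_map]
    rw [amain, cnt_eq]
    exact flatMap_range_chunks xs.length xs le_rfl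
  rw [ha, hb]
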